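-- pv_equiv track=rewrite | github.com/s7726/aoc2025 | day06/part2.py | fill_ops
-- ===== SOURCE A (Python) =====
-- def fill_ops(ops, lens):
--     cur = ""
--     filled = []
--     for op in ops:
--         if op != " ":
--             cur = op
--         filled.append(cur)
--     return filled
-- ===== SOURCE B (Python) =====
-- def fill_ops(ops, lens):
--     n = len(ops)
--
--     def end_of_spaces(i):
--         # index just past the run of " " starting at i
--         while i < n and ops[i] == " ":
--             i += 1
--         return i
--
--     j = end_of_spaces(0)
--     out = [""] * j
--     i = j
--     while i < n:
--         j = end_of_spaces(i + 1)
--         out += [ops[i]] * (j - i)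
--         i = j
--     return out
-- ===== Notes on version B (the rewrite author's own statement) =====
-- stated objective: alternative
-- what changed: B uses a run-length decomposition: it measures each maximal run (leading spaces, then each non-space operator with its trailing spaces) and expands it with list repetition, instead of a single element-by-element pass carrying the last operator.
import Mathlib
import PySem

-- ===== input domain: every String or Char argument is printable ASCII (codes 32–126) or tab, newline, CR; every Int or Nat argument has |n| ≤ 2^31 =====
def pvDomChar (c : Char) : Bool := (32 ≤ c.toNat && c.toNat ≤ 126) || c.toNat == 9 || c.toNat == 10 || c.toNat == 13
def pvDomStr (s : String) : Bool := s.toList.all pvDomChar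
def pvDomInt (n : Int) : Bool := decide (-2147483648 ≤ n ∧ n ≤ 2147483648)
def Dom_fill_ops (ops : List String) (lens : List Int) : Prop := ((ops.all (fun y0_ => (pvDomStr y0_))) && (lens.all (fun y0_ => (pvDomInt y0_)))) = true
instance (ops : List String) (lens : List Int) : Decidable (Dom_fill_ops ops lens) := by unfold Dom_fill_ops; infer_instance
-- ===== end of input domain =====

-- B replaces the carry-the-last-operator pass with a run-length decomposition
-- (find each run boundary by index, expand the run with list repetition); alternative, same cost.

-- ===== PORT A =====
def fill_ops_loop (cur : String) (filled : List String) (ops : List String) : List String :=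
  match ops with
  | [] => filled
  | op :: rest =>
      let cur' := if op ≠ " " then op else cur
      fill_ops_loop cur' (filled ++ [cur']) rest

def fill_ops (ops : List String) (lens : List Int) : List String :=
  fill_ops_loop "" [] ops

-- ===== PORT B =====
-- end_of_spaces(i): while i < n and ops[i] == " ": i += 1
-- (while loop with a fuel counter ≥ n - i, which only makes it total; ops[i] is in range there, getD is exact)
def pvEndSpaces (ops : List String) (n : Nat) : Nat → Nat → Nat
  | 0, i => i
  | fuel + 1, i => if i < n ∧ ops.getD i "" == " " then pvEndSpaces ops n fuel (i + 1) else i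

-- the outer while loop: out += [ops[i]] * (j - i); i = j   (fuel ≥ n - i again only makes it total)
def pvRunsLoop (ops : List String) (n : Nat) : Nat → List String → Nat → List String
  | 0, out, _ => out
  | fuel + 1, out, i =>
      if i < n then
        let j := pvEndSpaces ops n n (i + 1)
        pvRunsLoop ops n fuel (out ++ List.replicate (j - i) (ops.getD i "")) j
      else out

def fill_ops_alt (ops : List String) (lens : List Int) : List String :=
  let n := ops.length
  let j := pvEndSpaces ops n n 0
  pvRunsLoop ops n n (List.replicate j "") j

-- ===== PRECONDITION & SPEC =====
def Spec_fill_ops (ops : List String) (lens : List Int) (out : List String) : Prop := out = fill_ops_alt ops lens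
instance (ops : List String) (lens : List Int) (out : List String) : Decidable (Spec_fill_ops ops lens out) := by unfold Spec_fill_ops; infer_instance

-- ===== CLAIM (what is proved, stated in full; the proofs are below) =====
def Claim_equal_fill_ops : Prop := ∀ (ops : List String) (lens : List Int), Dom_fill_ops ops lens → Spec_fill_ops ops lens (fill_ops ops lens)

-- ===== LEMMAS AND PROOFS =====

-- the element-by-element forward fill, as a pure recursion (reference semantics)
def pvFill (cur : String) : List String → List String
  | [] => []
  | op :: rest =>
      let v := if op ≠ " " then op else cur
      v :: pvFill v rest

-- list-level counterparts of B's index loops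
def pvSpaces : List String → Nat
  | [] => 0
  | x :: xs => if x == " " then pvSpaces xs + 1 else 0

def pvRuns : List String → List String
  | [] => []
  | x :: xs =>
      let k := 1 + pvSpaces xs
      List.replicate k x ++ pvRuns ((x :: xs).drop k)
termination_by xs => xs.length
decreasing_by
  simp [List.length_drop]

theorem pvRuns_nil : pvRuns [] = [] := by rw [pvRuns.eq_def]

theorem fill_ops_loop_eq (ops : List String) (cur : String) (filled : List String) :
    fill_ops_loop cur filled ops = filled ++ pvFill cur ops := by
  induction ops generalizing cur filled with
  | nil => simp [fill_ops_loop, pvFill]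
  | cons op rest ih => simp [fill_ops_loop, pvFill, ih]

theorem drop_cons_of_lt (ops : List String) (i : Nat) (h : i < ops.length) :
    ops.drop i = ops.getD i "" :: ops.drop (i + 1) := by
  rw [List.drop_eq_getElem_cons h, List.getD_eq_getElem ops "" h]

theorem pvEndSpaces_eq (ops : List String) (fuel i : Nat) (hf : ops.length - i ≤ fuel) :
    pvEndSpaces ops ops.length fuel i = i + pvSpaces (ops.drop i) := by
  induction fuel generalizing i with
  | zero =>
      have hge : ops.length ≤ i := by omega
      rw [pvEndSpaces, List.drop_eq_nil_of_le hge]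
      simp [pvSpaces]
  | succ fuel ih =>
      rw [pvEndSpaces]
      by_cases hc : i < ops.length ∧ ops.getD i "" == " "
      · obtain ⟨hlt, hsp⟩ := hc
        rw [if_pos ⟨hlt, hsp⟩, ih (i + 1) (by omega), drop_cons_of_lt ops i hlt]
        simp only [pvSpaces, hsp, if_pos]
        omega
      · rw [if_neg hc]
        rcases Nat.lt_or_ge i ops.length with hlt | hge
        · have hsp : ¬ (ops.getD i "" == " ") = true := fun hs => hc ⟨hlt, hs⟩
          rw [drop_cons_of_lt ops i hlt]
          simp only [pvSpaces]
          rw [if_neg hsp]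
          omega
        · rw [List.drop_eq_nil_of_le hge]
          simp [pvSpaces]

theorem pvRunsLoop_eq (ops : List String) (fuel i : Nat) (out : List String)
    (hf : ops.length - i ≤ fuel) :
    pvRunsLoop ops ops.length fuel out i = out ++ pvRuns (ops.drop i) := by
  induction fuel generalizing i out with
  | zero =>
      have hge : ops.length ≤ i := by omega
      rw [pvRunsLoop, List.drop_eq_nil_of_le hge, pvRuns_nil, List.append_nil]
  | succ fuel ih =>
      rw [pvRunsLoop]
      rcases Nat.lt_or_ge i ops.length with hlt | hge
      · rw [if_pos hlt]
        simp only [pvEndSpaces_eq ops ops.length (i + 1) (by omega)]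
        rw [ih (i + 1 + pvSpaces (ops.drop (i + 1))) _ (by omega), List.append_assoc]
        congr 1
        rw [drop_cons_of_lt ops i hlt, pvRuns]
        have hk : i + 1 + pvSpaces (ops.drop (i + 1)) - i = 1 + pvSpaces (ops.drop (i + 1)) := by
          omega
        rw [hk]
        congr 1
        rw [← drop_cons_of_lt ops i hlt, List.drop_drop]
        have harith : i + (1 + pvSpaces (ops.drop (i + 1))) = i + 1 + pvSpaces (ops.drop (i + 1)) := by
          omega
        rw [harith]
      · rw [if_neg (by omega), List.drop_eq_nil_of_le hge, pvRuns_nil, List.append_nil]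

theorem pvFill_eq_runs (ops : List String) (cur : String) :
    pvFill cur ops = List.replicate (pvSpaces ops) cur ++ pvRuns (ops.drop (pvSpaces ops)) := by
  induction ops generalizing cur with
  | nil => simp [pvFill, pvSpaces, pvRuns_nil]
  | cons op rest ih =>
      by_cases h : op = " "
      · simp [pvFill, pvSpaces, h, List.replicate_succ, ih]
      · have hs : pvSpaces (op :: rest) = 0 := by simp [pvSpaces, h]
        rw [hs]
        simp only [List.replicate_zero, List.nil_append, List.drop_zero]
        rw [pvRuns.eq_def]
        simp only [List.replicate_add, List.replicate_one]
        have hdrop : (op :: rest).drop (1 + pvSpaces rest) = rest.drop (pvSpaces rest) := by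
          have h1 : 1 + pvSpaces rest = pvSpaces rest + 1 := by omega
          simp [h1]
        rw [hdrop]
        simp [pvFill, h, ih]

-- ===== VERDICT (by name: the statement is the Claim_ definition above) =====
theorem fill_ops_spec : Claim_equal_fill_ops := by
  intro ops lens _
  unfold Spec_fill_ops fill_ops fill_ops_alt
  simp only
  rw [fill_ops_loop_eq, pvEndSpaces_eq ops ops.length 0 (by omega), Nat.zero_add, List.drop_zero,
    pvRunsLoop_eq ops ops.length (pvSpaces ops) _ (by omega)]
  simpa using pvFill_eq_runs ops ""
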